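-- pv_equiv track=rewrite | github.com/HakePratik/Python-practice | Array/fishman sad happy.py | countHS
-- ===== SOURCE A (Python) =====
-- def countHS(fish_caught):
--     happycount = 0
--     sadcount = 0
--     for i in range(len(fish_caught)):
--         # Check if the current fish count is greater than all previous days
--         if all(fish_caught[i] > fish_caught[j] for j in range(i)):
--             happycount += 1
--         else:
--             sadcount += 1
--
--     return happycount, sadcount
-- ===== SOURCE B (Python) =====
-- def countHS(fish_caught):
--     happy = 0
--     best = None
--     for x in fish_caught:
--         if best is None or x > best:
--             happy += 1
--             best = x
--     return happy, len(fish_caught) - happy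
-- ===== Notes on version B (the rewrite author's own statement) =====
-- stated objective: faster
-- what changed: Replaced the quadratic all-previous scan per index by a single pass tracking the running maximum (a day is happy iff it exceeds the running max), deriving sad as len - happy.
import Mathlib
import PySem

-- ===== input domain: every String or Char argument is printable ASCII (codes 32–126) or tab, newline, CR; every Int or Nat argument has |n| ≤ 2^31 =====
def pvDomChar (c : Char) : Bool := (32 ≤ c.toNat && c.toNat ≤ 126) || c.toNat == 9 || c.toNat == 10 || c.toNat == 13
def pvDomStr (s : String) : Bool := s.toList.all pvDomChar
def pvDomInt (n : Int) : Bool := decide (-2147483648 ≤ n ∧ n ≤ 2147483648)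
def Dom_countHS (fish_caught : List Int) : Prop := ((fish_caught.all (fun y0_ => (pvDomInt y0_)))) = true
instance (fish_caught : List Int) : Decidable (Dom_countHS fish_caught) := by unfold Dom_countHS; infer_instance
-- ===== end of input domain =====

-- B replaces A's quadratic all-previous-days scan with a single pass over the list
-- tracking the running maximum (objective: faster, O(n) instead of O(n^2)).

-- ===== PORT A =====
-- indices i, j always satisfy 0 ≤ j < i < len, so pyGetD with default 0 is exact here
def countHS (fish_caught : List Int) : Int × Int :=
  (PySem.List.pyRange 0 fish_caught.length 1).foldl
    (fun (st : Int × Int) i =>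
      if (PySem.List.pyRange 0 i 1).all
          (fun j => decide (PySem.List.pyGetD fish_caught i 0 > PySem.List.pyGetD fish_caught j 0))
        then (st.1 + 1, st.2) else (st.1, st.2 + 1)) (0, 0)

-- ===== PORT B =====
-- loop body: best is None or x > best → happy += 1, best = x
def bstep (st : Int × Option Int) (x : Int) : Int × Option Int :=
  match st.2 with
  | none => (st.1 + 1, some x)
  | some b => if x > b then (st.1 + 1, some x) else (st.1, some b)

def countHS_alt (fish_caught : List Int) : Int × Int :=
  let hb := fish_caught.foldl bstep (0, none)
  (hb.1, (fish_caught.length : Int) - hb.1)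

-- ===== PRECONDITION & SPEC =====
def Spec_countHS (fish_caught : List Int) (out : Int × Int) : Prop := out = countHS_alt fish_caught
instance (fish_caught : List Int) (out : Int × Int) : Decidable (Spec_countHS fish_caught out) := by unfold Spec_countHS; infer_instance

-- ===== CLAIM (what is proved, stated in full; the proofs are below) =====
def Claim_equal_countHS : Prop := ∀ (fish_caught : List Int), Dom_countHS fish_caught → Spec_countHS fish_caught (countHS fish_caught)

-- ===== LEMMAS AND PROOFS =====

def bstate (L : List Int) : Int × Option Int := L.foldl bstep (0, none)

-- the "x would be a strict new maximum" test that B's state encodes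
def bcond (m : Option Int) (x : Int) : Bool :=
  match m with
  | none => true
  | some b => decide (x > b)

theorem bstate_append (L : List Int) (x : Int) :
    bstate (L ++ [x]) = bstep (bstate L) x := by
  simp [bstate, List.foldl_append]

theorem getD_append_lt (L : List Int) (x : Int) (j : Int) (h0 : 0 ≤ j) (h1 : j < (L.length : Int)) :
    PySem.List.pyGetD (L ++ [x]) j 0 = PySem.List.pyGetD L j 0 := by
  rw [PySem.List.pyGetD_eq_getElem (L ++ [x]) 0 h0 (by simp; omega),
      PySem.List.pyGetD_eq_getElem L 0 h0 (by omega)]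
  rw [List.getElem_append_left (by omega)]

theorem countHS_append (L : List Int) (x : Int) :
    countHS (L ++ [x]) =
      (if L.all (fun y => decide (x > y))
        then ((countHS L).1 + 1, (countHS L).2)
        else ((countHS L).1, (countHS L).2 + 1)) := by
  have hlen : ((L ++ [x]).length : Int) = (L.length : Int) + 1 := by
    simp
  unfold countHS
  rw [hlen, PySem.List.pyRange_one_succ_right (by omega), List.foldl_append]
  -- the first L.length iterations only read indices < L.length, so L ++ [x] reads as L
  have hmaps : ∀ i : Int, i ≤ (L.length : Int) →
      (PySem.List.pyRange 0 i 1).map (fun j => PySem.List.pyGetD (L ++ [x]) j 0) =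
      (PySem.List.pyRange 0 i 1).map (fun j => PySem.List.pyGetD L j 0) := by
    intro i hi
    apply List.map_congr_left
    intro j hj
    rw [PySem.List.mem_pyRange_one] at hj
    exact getD_append_lt L x j hj.1 (by omega)
  have hcond : ∀ i : Int, 0 ≤ i → i < (L.length : Int) →
      ((PySem.List.pyRange 0 i 1).all
        (fun j => decide (PySem.List.pyGetD (L ++ [x]) i 0 > PySem.List.pyGetD (L ++ [x]) j 0))) =
      ((PySem.List.pyRange 0 i 1).all
        (fun j => decide (PySem.List.pyGetD L i 0 > PySem.List.pyGetD L j 0))) := by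
    intro i h0 h1
    calc (PySem.List.pyRange 0 i 1).all
          (fun j => decide (PySem.List.pyGetD (L ++ [x]) i 0 > PySem.List.pyGetD (L ++ [x]) j 0))
        = ((PySem.List.pyRange 0 i 1).map (fun j => PySem.List.pyGetD (L ++ [x]) j 0)).all
            (fun v => decide (PySem.List.pyGetD (L ++ [x]) i 0 > v)) := by rw [List.all_map]; rfl
      _ = ((PySem.List.pyRange 0 i 1).map (fun j => PySem.List.pyGetD L j 0)).all
            (fun v => decide (PySem.List.pyGetD (L ++ [x]) i 0 > v)) := by rw [hmaps i (by omega)]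
      _ = (PySem.List.pyRange 0 i 1).all
            (fun j => decide (PySem.List.pyGetD L i 0 > PySem.List.pyGetD L j 0)) := by
            rw [List.all_map, getD_append_lt L x i h0 h1]; rfl
  have hcongr :
      (PySem.List.pyRange 0 (L.length : Int) 1).foldl
        (fun (st : Int × Int) i =>
          if (PySem.List.pyRange 0 i 1).all
              (fun j => decide (PySem.List.pyGetD (L ++ [x]) i 0 > PySem.List.pyGetD (L ++ [x]) j 0))
            then (st.1 + 1, st.2) else (st.1, st.2 + 1)) (0, 0) =
      (PySem.List.pyRange 0 (L.length : Int) 1).foldl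
        (fun (st : Int × Int) i =>
          if (PySem.List.pyRange 0 i 1).all
              (fun j => decide (PySem.List.pyGetD L i 0 > PySem.List.pyGetD L j 0))
            then (st.1 + 1, st.2) else (st.1, st.2 + 1)) (0, 0) := by
    apply PySem.List.foldl_congr_mem
    intro acc i hi
    rw [PySem.List.mem_pyRange_one] at hi
    rw [hcond i hi.1 hi.2]
  rw [hcongr]
  -- the last iteration: index L.length reads x, earlier indices read L
  have hx : PySem.List.pyGetD (L ++ [x]) (L.length : Int) 0 = x := by
    rw [PySem.List.pyGetD_eq_getElem (L ++ [x]) 0 (by omega) (by simp)]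
    simp
  have hall :
      (PySem.List.pyRange 0 (L.length : Int) 1).all
        (fun j => decide (PySem.List.pyGetD (L ++ [x]) (L.length : Int) 0 > PySem.List.pyGetD (L ++ [x]) j 0)) =
      L.all (fun y => decide (x > y)) := by
    have hL := PySem.List.map_pyGetD_pyRange' (xs := L) (d := 0) (a := 0) (by omega)
    simp only [Int.toNat_zero, List.drop_zero] at hL
    calc (PySem.List.pyRange 0 (L.length : Int) 1).all
          (fun j => decide (PySem.List.pyGetD (L ++ [x]) (L.length : Int) 0 > PySem.List.pyGetD (L ++ [x]) j 0))
        = ((PySem.List.pyRange 0 (L.length : Int) 1).map (fun j => PySem.List.pyGetD (L ++ [x]) j 0)).all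
            (fun v => decide (PySem.List.pyGetD (L ++ [x]) (L.length : Int) 0 > v)) := by
            rw [List.all_map]; rfl
      _ = ((PySem.List.pyRange 0 (L.length : Int) 1).map (fun j => PySem.List.pyGetD L j 0)).all
            (fun v => decide (PySem.List.pyGetD (L ++ [x]) (L.length : Int) 0 > v)) := by
            rw [hmaps (L.length : Int) (by omega)]
      _ = L.all (fun y => decide (x > y)) := by rw [hL, hx]
  simp only [List.foldl_cons, List.foldl_nil, hall]

theorem bcond_eq_all (L : List Int) :
    ∀ x : Int, bcond (bstate L).2 x = L.all (fun y => decide (x > y)) := by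
  induction L using List.reverseRecOn with
  | nil => intro x; rfl
  | append_singleton L z ih =>
    intro x
    rw [bstate_append]
    cases hm : (bstate L).2 with
    | none =>
      simp [bcond, bstep, hm]
      intro _ t ht
      have h := ih x
      rw [hm] at h
      simp only [bcond] at h
      have h' := h.symm
      rw [List.all_eq_true] at h'
      simpa using h' t ht
    | some b =>
      by_cases hzb : z > b
      · -- new maximum z: everything in L is below z, so x > z beats all of L too
        have hz := ih z
        rw [hm] at hz
        simp only [bcond] at hz
        have hzall : L.all (fun y => decide (z > y)) = true := by
          rw [← hz]; simpa using hzb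
        simp [bcond, bstep, hm, hzb]
        intro hxz t ht
        rw [List.all_eq_true] at hzall
        have := hzall t ht
        simp at this
        omega
      · -- maximum unchanged: x > b already implies x > z since z ≤ b
        have hb := ih x
        rw [hm] at hb
        simp only [bcond] at hb
        simp only [bstep, hm, if_neg hzb, bcond, List.all_append, List.all_cons, List.all_nil,
          Bool.and_true]
        rw [hb]
        by_cases hbx : b < x
        · have hzx : z < x := by omega
          have hallt : L.all (fun y => decide (x > y)) = true := by
            rw [← hb]; simpa using hbx
          simp [hallt, hzx]
        · have hallf : L.all (fun y => decide (x > y)) = false := by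
            rw [← hb]; simpa using hbx
          simp [hallf]

theorem countHS_eq_bstate (L : List Int) :
    countHS L = ((bstate L).1, (L.length : Int) - (bstate L).1) := by
  induction L using List.reverseRecOn with
  | nil => simp [countHS, bstate]
  | append_singleton L z ih =>
    rw [countHS_append, ih, ← bcond_eq_all L z, bstate_append]
    cases hm : (bstate L).2 with
    | none =>
      simp [bcond, bstep, hm]
    | some b =>
      by_cases hzb : z > b
      · simp [bcond, bstep, hm, hzb]
      · simp [bcond, bstep, hm, hzb, Prod.ext_iff]
        omega

-- ===== VERDICT (by name: the statement is the Claim_ definition above) =====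
theorem countHS_spec : Claim_equal_countHS := by
  intro L _
  unfold Spec_countHS countHS_alt
  exact countHS_eq_bstate L
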